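-- pv_equiv track=rewrite | github.com/numpde/as | p/single-cell/20171130-BCXX/9_tree.py | abbr
-- ===== SOURCE A (Python) =====
-- def abbr(t, n) :
-- 	D = {
-- 		"negative regulation" : "neg regu",
-- 		"positive regulation" : "pos regu",
-- 		"replication" : "repl",
-- 		"involved in" : "in",
-- 		"regulation" : "regu",
-- 		"synthesis" : "syn",
-- 		"double" : "dbl",
-- 		"single" : "sgl",
-- 		"error" : "err",
-- 	}
--
-- 	for (S, s) in sorted(D.items(), key=(lambda x : -len(x[0]))) :
-- 		t = t.replace(S, s)
--
-- 	if (len(t) > (n + 3)) :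
-- 		t = t[0:n] + "..."
--
-- 	return t
-- ===== SOURCE B (Python) =====
-- # Same nine sequential passes (forced: a one-pass regex over all keys is NOT
-- # equivalent -- A's passes cascade, e.g. abbr("sinvolved ingle", 99) == "sgl"
-- # because "involved in"->"in" first forms "single"; a single scan would return
-- # "single").  Each pass is done by the split/join idiom -- partition the text on
-- # the key and rejoin the pieces with the replacement, which equals one
-- # left-to-right non-overlapping replace pass -- and the table is a precomputed
-- # length-ordered constant folded by recursion instead of a dict sorted per call.
--
-- _TABLE = (
--     ("negative regulation", "neg regu"),
--     ("positive regulation", "pos regu"),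
--     ("replication", "repl"),
--     ("involved in", "in"),
--     ("regulation", "regu"),
--     ("synthesis", "syn"),
--     ("double", "dbl"),
--     ("single", "sgl"),
--     ("error", "err"),
-- )
--
-- def _go(t, pairs):
--     if not pairs:
--         return t
--     (S, s) = pairs[0]
--     return _go(s.join(t.split(S)), pairs[1:])
--
-- def abbr(t, n):
--     u = _go(t, _TABLE)
--     return u if len(u) <= n + 3 else u[0:n] + "..."
-- ===== Notes on version B (the rewrite author's own statement) =====
-- stated objective: alternative
-- what changed: B keeps the forced sequential nine-pass semantics (a one-pass multi-key regex scan is not equivalent because A's passes cascade, e.g. 'sinvolved ingle' -> 'sgl') but performs each pass by the split/join idiom - partition the text on the key with str.split and rejoin the pieces with the replacement - folding a precomputed length-ordered constant table by recursion instead of sorting a dict per call and calling str.replace.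
import Mathlib
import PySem

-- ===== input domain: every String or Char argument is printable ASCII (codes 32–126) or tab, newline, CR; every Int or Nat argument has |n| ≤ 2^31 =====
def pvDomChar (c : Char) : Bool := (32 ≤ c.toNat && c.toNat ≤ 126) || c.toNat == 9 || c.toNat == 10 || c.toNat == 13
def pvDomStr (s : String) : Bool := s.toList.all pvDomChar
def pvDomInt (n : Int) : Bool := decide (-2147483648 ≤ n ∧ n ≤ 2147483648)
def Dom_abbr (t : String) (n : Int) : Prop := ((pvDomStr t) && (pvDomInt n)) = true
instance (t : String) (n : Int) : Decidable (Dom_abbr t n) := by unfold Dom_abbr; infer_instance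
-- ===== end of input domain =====

-- B keeps the sequential nine-pass semantics (a one-pass multi-key scan is not
-- equivalent: the passes cascade) but does each pass by the split/join idiom —
-- partition on the key, rejoin with the replacement — over a precomputed
-- length-ordered constant table folded by recursion; same value everywhere.

-- ===== PORT A =====
def abbr (t : String) (n : Int) : String :=
  let D : PySem.Dict String String := PySem.Dict.ofList
    [("negative regulation", "neg regu"), ("positive regulation", "pos regu"),
     ("replication", "repl"), ("involved in", "in"), ("regulation", "regu"),
     ("synthesis", "syn"), ("double", "dbl"), ("single", "sgl"), ("error", "err")]
  let t1 := (PySem.List.sorted D.items (fun x => -(PySem.Str.len x.1))).foldl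
      (fun t Ss => PySem.Str.replace t Ss.1 Ss.2) t
  if PySem.Str.len t1 > n + 3 then PySem.Str.slice t1 (some 0) (some n) ++ "..." else t1

-- ===== PORT B =====
def pvTable : List (String × String) :=
  [("negative regulation", "neg regu"), ("positive regulation", "pos regu"),
   ("replication", "repl"), ("involved in", "in"), ("regulation", "regu"),
   ("synthesis", "syn"), ("double", "dbl"), ("single", "sgl"), ("error", "err")]

-- Source B's _go: recursion over the pairs; s.join(t.split(S)) with the nonempty
-- literal separators of pvTable is PySem.Chars.join/splitOn (the sep ≠ "" form)
def pvGo (t : String) (pairs : List (String × String)) : String :=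
  match pairs with
  | [] => t
  | (S, s) :: rest =>
      pvGo (String.ofList (PySem.Chars.join s.toList (PySem.Chars.splitOn t.toList S.toList))) rest

def abbr_alt (t : String) (n : Int) : String :=
  let u := pvGo t pvTable
  if PySem.Str.len u ≤ n + 3 then u
  else PySem.Str.slice u (some 0) (some n) ++ "..."

-- ===== PRECONDITION & SPEC =====
def Spec_abbr (t : String) (n : Int) (out : String) : Prop := out = abbr_alt t n
instance (t : String) (n : Int) (out : String) : Decidable (Spec_abbr t n out) := by unfold Spec_abbr; infer_instance

-- ===== CLAIM (what is proved, stated in full; the proofs are below) =====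
def Claim_equal_abbr : Prop := ∀ (t : String) (n : Int), Dom_abbr t n → Spec_abbr t n (abbr t n)

-- ===== LEMMAS AND PROOFS =====

-- canonical result of one left-to-right non-overlapping replacement pass (proof-only)
def pvCanon (old new : List Char) : List Char → List Char
  | [] => []
  | c :: t =>
    if old.isPrefixOf (c :: t) then new ++ pvCanon old new (t.drop (old.length - 1))
    else c :: pvCanon old new t
termination_by t => t.length
decreasing_by all_goals (simp [List.length_drop]; try omega)

-- canonical split on a nonempty separator (proof-only)
def pvConsHead (c : Char) : List (List Char) → List (List Char)
  | [] => [[c]]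
  | p :: ps => (c :: p) :: ps

def pvParts (old : List Char) : List Char → List (List Char)
  | [] => [[]]
  | c :: t =>
    if old.isPrefixOf (c :: t) then [] :: pvParts old (t.drop (old.length - 1))
    else pvConsHead c (pvParts old t)
termination_by t => t.length
decreasing_by all_goals (simp [List.length_drop]; try omega)

def pvHeadApp (pre : List Char) : List (List Char) → List (List Char)
  | [] => [pre]
  | p :: ps => (pre ++ p) :: ps

theorem pvConsHead_ne_nil (c : Char) (ps : List (List Char)) : pvConsHead c ps ≠ [] := by
  cases ps <;> simp [pvConsHead]

theorem pvParts_ne_nil (old : List Char) (t : List Char) : pvParts old t ≠ [] := by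
  match t with
  | [] => simp [pvParts]
  | c :: t =>
    simp only [pvParts]
    split
    · simp
    · exact pvConsHead_ne_nil c _

theorem pvHeadApp_nil_of_ne_nil (ps : List (List Char)) (h : ps ≠ []) :
    pvHeadApp [] ps = ps := by
  cases ps with
  | nil => exact absurd rfl h
  | cons p ps => simp [pvHeadApp]

theorem pvHeadApp_consHead (pre : List Char) (c : Char) (ps : List (List Char)) :
    pvHeadApp pre (pvConsHead c ps) = pvHeadApp (pre ++ [c]) ps := by
  cases ps <;> simp [pvHeadApp, pvConsHead]

-- joining the canonical parts with the replacement IS one replacement pass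
theorem pvJoin_parts (old new : List Char) :
    ∀ (N : Nat) (t : List Char), t.length ≤ N →
    PySem.Chars.join new (pvParts old t) = pvCanon old new t := by
  intro N
  induction N with
  | zero =>
    intro t ht
    have : t = [] := List.eq_nil_of_length_eq_zero (Nat.le_zero.mp ht)
    subst this
    simp [pvParts, pvCanon, PySem.Chars.join_singleton]
  | succ N ih =>
    intro t ht
    match t with
    | [] => simp [pvParts, pvCanon, PySem.Chars.join_singleton]
    | c :: t =>
      simp only [pvParts, pvCanon]
      have hlen : t.length ≤ N := by simp only [List.length_cons] at ht; omega
      split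
      · obtain ⟨q, qs, hq⟩ := List.exists_cons_of_ne_nil
          (pvParts_ne_nil old (t.drop (old.length - 1)))
        have hd : (t.drop (old.length - 1)).length ≤ N := by
          simp only [List.length_drop]; omega
        rw [hq, PySem.Chars.join_cons_cons, ← hq, ih _ hd]
        simp
      · obtain ⟨q, qs, hq⟩ := List.exists_cons_of_ne_nil (pvParts_ne_nil old t)
        rw [← ih _ hlen, hq]
        cases qs with
        | nil => simp [pvConsHead, PySem.Chars.join_singleton]
        | cons q2 qs => simp [pvConsHead, PySem.Chars.join_cons_cons]

-- unfolding equations of PySem.Chars.splitOn.go (rfl, structural recursion on the fuel)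
theorem pvSplitGo_nil (sep : List Char) (fuel : Nat) (cur : List Char) (acc : List (List Char)) :
    PySem.Chars.splitOn.go sep (fuel + 1) [] cur acc = (cur.reverse :: acc).reverse := rfl

theorem pvSplitGo_cons (sep : List Char) (fuel : Nat) (c : Char) (rest cur : List Char)
    (acc : List (List Char)) :
    PySem.Chars.splitOn.go sep (fuel + 1) (c :: rest) cur acc =
      if sep.isPrefixOf (c :: rest) then
        PySem.Chars.splitOn.go sep fuel (List.drop sep.length (c :: rest)) [] (cur.reverse :: acc)
      else PySem.Chars.splitOn.go sep fuel rest (c :: cur) acc := rfl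

-- splitOn computes the canonical parts
theorem pvSplitGo_eq (sep : List Char) (hsep : sep ≠ []) :
    ∀ (fuel : Nat) (l cur : List Char) (acc : List (List Char)), l.length + 1 ≤ fuel →
    PySem.Chars.splitOn.go sep fuel l cur acc =
      acc.reverse ++ pvHeadApp cur.reverse (pvParts sep l) := by
  intro fuel
  induction fuel with
  | zero => intro l cur acc hl; omega
  | succ fuel ih =>
    intro l cur acc hl
    match l with
    | [] =>
      rw [pvSplitGo_nil]
      simp [pvParts, pvHeadApp]
    | c :: rest =>
      rw [pvSplitGo_cons]
      have hsp : 0 < sep.length := List.length_pos_iff.mpr hsep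
      simp only [List.length_cons] at hl
      by_cases hpre : sep.isPrefixOf (c :: rest) = true
      · rw [if_pos hpre]
        have hdl : (List.drop sep.length (c :: rest)).length + 1 ≤ fuel := by
          simp only [List.length_drop, List.length_cons]; omega
        rw [ih _ _ _ hdl]
        have hdrop : List.drop sep.length (c :: rest) = rest.drop (sep.length - 1) := by
          cases sep with
          | nil => exact absurd rfl hsep
          | cons a as => simp
        have hp : pvParts sep (c :: rest)
            = [] :: pvParts sep (rest.drop (sep.length - 1)) := by
          simp [pvParts, hpre]
        rw [hdrop, hp]
        simp only [List.reverse_nil]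
        rw [pvHeadApp_nil_of_ne_nil _ (pvParts_ne_nil _ _)]
        simp [pvHeadApp]
      · rw [if_neg hpre]
        rw [ih _ _ _ (by omega)]
        have hp : pvParts sep (c :: rest) = pvConsHead c (pvParts sep rest) := by
          simp [pvParts, hpre]
        rw [hp, pvHeadApp_consHead]
        simp

theorem pvSplitOn_eq (t sep : List Char) (hsep : sep ≠ []) :
    PySem.Chars.splitOn t sep = pvParts sep t := by
  rw [PySem.Chars.splitOn, pvSplitGo_eq sep hsep _ _ _ _ (by omega)]
  simp [pvHeadApp_nil_of_ne_nil _ (pvParts_ne_nil sep t)]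

-- A's str.replace also computes the canonical pass (via replace.go)
theorem pvReplaceGo_eq (old new : List Char) (hold : old ≠ []) :
    ∀ (fuel : Nat) (l acc : List Char), l.length ≤ fuel →
    PySem.Chars.replace.go old new fuel l acc = acc.reverse ++ pvCanon old new l := by
  intro fuel
  induction fuel with
  | zero =>
    intro l acc hl
    have : l = [] := List.eq_nil_of_length_eq_zero (Nat.le_zero.mp hl)
    subst this
    simp [PySem.Chars.replace.go, pvCanon]
  | succ fuel ih =>
    intro l acc hl
    match l with
    | [] => simp [PySem.Chars.replace.go, pvCanon]
    | c :: t =>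
      rw [PySem.Chars.replace.go]
      obtain ⟨m, hm⟩ : ∃ m, old.length = m + 1 := by
        cases old with
        | nil => exact absurd rfl hold
        | cons o os => exact ⟨os.length, rfl⟩
      by_cases hpre : old.isPrefixOf (c :: t) = true
      · rw [if_pos hpre]
        have hlen : (List.drop old.length (c :: t)).length ≤ fuel := by
          simp only [List.length_drop, List.length_cons]
          simp only [List.length_cons] at hl
          omega
        rw [ih _ _ hlen]
        simp only [pvCanon, if_pos hpre]
        rw [hm, List.drop_succ_cons]
        simp
      · rw [if_neg hpre]
        have hlen : t.length ≤ fuel := by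
          simp only [List.length_cons] at hl
          omega
        rw [ih _ _ hlen]
        simp [pvCanon, hpre]

-- one pass of A (str.replace) = one pass of B (join of split)
theorem pvPass_eq (t old new : String) (hold : old.toList ≠ []) :
    PySem.Str.replace t old new
      = String.ofList (PySem.Chars.join new.toList (PySem.Chars.splitOn t.toList old.toList)) := by
  have hng : ¬ old.toList.isEmpty = true := by simpa [List.isEmpty_iff] using hold
  simp only [PySem.Str.replace, PySem.Chars.replace, if_neg hng]
  rw [pvReplaceGo_eq _ _ hold _ _ _ le_rfl, pvSplitOn_eq _ _ hold,
    pvJoin_parts _ _ t.toList.length _ le_rfl]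
  simp

-- the dict literal's items, evaluated by rewriting (kernel 'decide' on the strings is slow)
theorem pvItems_eq :
    (PySem.Dict.ofList
      [("negative regulation", "neg regu"), ("positive regulation", "pos regu"),
       ("replication", "repl"), ("involved in", "in"), ("regulation", "regu"),
       ("synthesis", "syn"), ("double", "dbl"), ("single", "sgl"), ("error", "err")]).items
      = pvTable := by
  simp [PySem.Dict.ofList, PySem.Dict.update, PySem.Dict.insert, PySem.Dict.contains,
    PySem.Dict.empty, pvTable, List.foldl]

-- the items are already in weakly descending key length, so the stable sort is the identity
theorem pvSorted_pairs :
    PySem.List.sorted (PySem.Dict.ofList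
      [("negative regulation", "neg regu"), ("positive regulation", "pos regu"),
       ("replication", "repl"), ("involved in", "in"), ("regulation", "regu"),
       ("synthesis", "syn"), ("double", "dbl"), ("single", "sgl"), ("error", "err")]).items
      (fun x => -(PySem.Str.len x.1)) = pvTable := by
  rw [pvItems_eq]
  exact PySem.List.sorted_eq_self_of_pairwise _ _ (by decide)

theorem pvFold_go (pairs : List (String × String)) (h : ∀ p ∈ pairs, p.1.toList ≠ []) :
    ∀ t, pairs.foldl (fun t Ss => PySem.Str.replace t Ss.1 Ss.2) t = pvGo t pairs := by
  induction pairs with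
  | nil => intro t; simp [pvGo]
  | cons p rest ih =>
    intro t
    obtain ⟨S, s⟩ := p
    simp only [List.foldl, pvGo]
    rw [pvPass_eq _ _ _ (h (S, s) (by simp))]
    exact ih (fun q hq => h q (by simp [hq])) _

theorem pvFold_eq (t : String) :
    pvTable.foldl (fun t Ss => PySem.Str.replace t Ss.1 Ss.2) t = pvGo t pvTable :=
  pvFold_go pvTable (by decide) t

-- ===== VERDICT (by name: the statement is the Claim_ definition above) =====
theorem abbr_spec : Claim_equal_abbr := by
  intro t n _
  simp only [Spec_abbr, abbr, abbr_alt]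
  rw [pvSorted_pairs, pvFold_eq]
  split_ifs with h1 h2 <;> first | omega | rfl
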